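-- pv_equiv track=rewrite | github.com/FishLeAdit/CSE221-Lab | Lab 4/Task 6/Task6.py | jumanji_max_diamond
-- ===== SOURCE A (Python) =====
-- def jumanji_max_diamond(rc, cc, graph):
--     def dfs(row, col):
--         if row < 0 or row >= rc or col < 0 or col >= cc or graph[row][col] == '#' or visited[row][col]:
--             return 0
--
--         visited[row][col] = True
--         diamonds = 0
--
--         if graph[row][col] == 'D':
--             diamonds = 1
--
--         diamonds += dfs(row + 1, col)
--         diamonds += dfs(row - 1, col)
--         diamonds += dfs(row, col + 1)
--         diamonds += dfs(row, col - 1)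
--
--         return diamonds
--
--     visited = [[False for _ in range(cc)] for _ in range(rc)]
--     max_diamonds = 0
--
--     for i in range(rc):
--         for j in range(cc):
--             if graph[i][j] == '.' and not visited[i][j]:
--                 max_diamonds = max(max_diamonds, dfs(i, j))
--
--     return max_diamonds
-- ===== SOURCE B (Python) =====
-- def jumanji_max_diamond(rc, cc, graph):
--     visited = set()
--     max_diamonds = 0
--     for i in range(rc):
--         for j in range(cc):
--             if graph[i][j] == '.' and (i, j) not in visited:
--                 count = 0
--                 stack = [(i, j)]
--                 while stack:
--                     r, c = stack.pop()
--                     if r < 0 or r >= rc or c < 0 or c >= cc or graph[r][c] == '#' or (r, c) in visited: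
--                         continue
--                     visited.add((r, c))
--                     if graph[r][c] == 'D':
--                         count += 1
--                     stack.extend(((r, c - 1), (r, c + 1), (r - 1, c), (r + 1, c)))
--                 max_diamonds = max(max_diamonds, count)
--     return max_diamonds
-- ===== Notes on version B (the rewrite author's own statement) =====
-- stated objective: alternative
-- what changed: The recursive DFS with a 2D visited matrix is replaced by an iterative flood fill using an explicit stack and a visited set, removing recursion entirely.
import Mathlib
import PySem

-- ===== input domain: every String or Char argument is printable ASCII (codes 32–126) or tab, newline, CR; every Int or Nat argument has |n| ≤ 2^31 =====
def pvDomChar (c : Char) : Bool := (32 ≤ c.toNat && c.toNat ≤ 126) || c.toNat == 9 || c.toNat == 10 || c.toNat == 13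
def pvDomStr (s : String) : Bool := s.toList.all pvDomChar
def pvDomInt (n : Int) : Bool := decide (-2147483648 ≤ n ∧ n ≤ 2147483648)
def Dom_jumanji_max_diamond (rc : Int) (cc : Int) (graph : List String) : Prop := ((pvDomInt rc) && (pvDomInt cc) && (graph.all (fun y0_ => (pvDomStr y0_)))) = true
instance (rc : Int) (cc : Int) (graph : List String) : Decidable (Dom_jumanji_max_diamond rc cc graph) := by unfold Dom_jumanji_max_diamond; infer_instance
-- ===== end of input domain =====

-- B replaces A's recursive DFS with a 2D visited matrix by an iterative explicit-stack
-- flood fill over a visited set (alternative decomposition, same asymptotic cost;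
-- only the return value is compared — neither side mutates its arguments).

-- ===== PORT A =====
-- graph[r][c] (both indices are in range whenever evaluated under Pre_; ' ' default off Pre_)
def pvCell (graph : List String) (r c : Int) : Char :=
  ((PySem.List.pyGet? graph r).bind (fun s => PySem.Str.pyGet? s c)).getD ' '

-- the guard of A's dfs (also reused, unchanged, as B's pop-time guard)
def pvBlocked (rc cc : Int) (graph : List String) (r c : Int) (v : List (Int × Int)) : Bool :=
  decide (r < 0) || decide (r ≥ rc) || decide (c < 0) || decide (c ≥ cc) ||
    (pvCell graph r c == '#') || v.contains (r, c)

-- all in-bounds cells (used only for the fuel of A's dfs and B's termination measure)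
def pvCells (rc cc : Int) : List (Int × Int) :=
  (PySem.List.pyRange 0 rc 1).flatMap (fun i => (PySem.List.pyRange 0 cc 1).map (fun j => (i, j)))

-- A's recursive dfs; visited is the set of marked cells, fuel only makes the recursion
-- total ((pvCells rc cc).length + 1 always exceeds the recursion depth, proved below)
def pvDfsA (rc cc : Int) (graph : List String) : Nat → Int → Int → List (Int × Int) → Int × List (Int × Int)
  | 0, _, _, v => (0, v)
  | f + 1, r, c, v =>
    if pvBlocked rc cc graph r c v then (0, v)
    else
      let v1 := (r, c) :: v
      let d0 : Int := if pvCell graph r c == 'D' then 1 else 0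
      let p1 := pvDfsA rc cc graph f (r + 1) c v1
      let p2 := pvDfsA rc cc graph f (r - 1) c p1.2
      let p3 := pvDfsA rc cc graph f r (c + 1) p2.2
      let p4 := pvDfsA rc cc graph f r (c - 1) p3.2
      (d0 + p1.1 + p2.1 + p3.1 + p4.1, p4.2)

def jumanji_max_diamond (rc : Int) (cc : Int) (graph : List String) : Int :=
  ((PySem.List.pyRange 0 rc 1).foldl (fun (st : Int × List (Int × Int)) i =>
    (PySem.List.pyRange 0 cc 1).foldl (fun st j =>
      if pvCell graph i j == '.' && !st.2.contains (i, j) then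
        let p := pvDfsA rc cc graph ((pvCells rc cc).length + 1) i j st.2
        (max st.1 p.1, p.2)
      else st) st) ((0 : Int), ([] : List (Int × Int)))).1

-- ===== PORT B =====
-- number of in-bounds cells not yet visited: B's termination measure
def pvFree (rc cc : Int) (v : List (Int × Int)) : Nat :=
  ((pvCells rc cc).filter (fun p => !v.contains p)).length

theorem pv_length_filter_mono {α : Type} (l : List α) (p q : α → Bool)
    (h : ∀ x, q x = true → p x = true) : (l.filter q).length ≤ (l.filter p).length :=
  (List.monotone_filter_right l h).length_le

theorem pv_length_filter_lt {α : Type} (l : List α) (p q : α → Bool)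
    (h : ∀ x, q x = true → p x = true) (a : α) (ha : a ∈ l)
    (hpa : p a = true) (hqa : q a = false) :
    (l.filter q).length < (l.filter p).length := by
  induction l with
  | nil => cases ha
  | cons x xs ih =>
    rw [List.filter_cons, List.filter_cons]
    rcases List.mem_cons.mp ha with rfl | hmem
    · rw [hpa, hqa]
      have := pv_length_filter_mono xs p q h
      simp; omega
    · have hm := pv_length_filter_mono xs p q h
      have hl := ih hmem
      by_cases hq : q x = true
      · rw [hq, h x hq]; simpa using hl
      · rw [Bool.not_eq_true] at hq; rw [hq]
        by_cases hp : p x = true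
        · rw [hp]; simp; omega
        · rw [Bool.not_eq_true] at hp; rw [hp]; simpa using hl

theorem pv_mem_cells (rc cc r c : Int) (h0 : 0 ≤ r) (h1 : r < rc) (h2 : 0 ≤ c) (h3 : c < cc) :
    (r, c) ∈ pvCells rc cc := by
  unfold pvCells
  exact List.mem_flatMap.mpr ⟨r, (PySem.List.mem_pyRange_one).mpr ⟨h0, h1⟩,
    List.mem_map_of_mem ((PySem.List.mem_pyRange_one).mpr ⟨h2, h3⟩)⟩

theorem pvFree_cons_lt (rc cc : Int) (graph : List String) (r c : Int) (v : List (Int × Int))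
    (h : pvBlocked rc cc graph r c v = false) :
    pvFree rc cc ((r, c) :: v) < pvFree rc cc v := by
  simp only [pvBlocked, Bool.or_eq_false_iff, decide_eq_false_iff_not, not_lt, not_le] at h
  obtain ⟨⟨⟨⟨⟨h0, h1⟩, h2⟩, h3⟩, _⟩, hv⟩ := h
  apply pv_length_filter_lt
  · intro x hx
    simp only [Bool.not_eq_true', List.contains_eq_mem, decide_eq_false_iff_not,
      List.mem_cons] at hx ⊢
    intro hm; exact hx (Or.inr hm)
  · exact pv_mem_cells rc cc r c h0 h1 h2 h3
  · simpa [List.contains_eq_mem] using hv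
  · simp [List.contains_eq_mem]

-- B's fill loop: pop a cell off the stack, skip it if blocked, otherwise mark it,
-- count its diamond and push its four neighbours
def pvFill (rc cc : Int) (graph : List String) : List (Int × Int) → List (Int × Int) → Int × List (Int × Int)
  | [], v => (0, v)
  | (r, c) :: S, v =>
    if h : pvBlocked rc cc graph r c v = true then pvFill rc cc graph S v
    else
      let v1 := (r, c) :: v
      let d0 : Int := if pvCell graph r c == 'D' then 1 else 0
      let p := pvFill rc cc graph ((r + 1, c) :: (r - 1, c) :: (r, c + 1) :: (r, c - 1) :: S) v1
      (d0 + p.1, p.2)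
  termination_by S v => (pvFree rc cc v, S.length)
  decreasing_by
  · apply Prod.Lex.right; simp
  · apply Prod.Lex.left
    exact pvFree_cons_lt rc cc graph r c v (Bool.not_eq_true _ ▸ h)

def jumanji_max_diamond_alt (rc : Int) (cc : Int) (graph : List String) : Int :=
  ((PySem.List.pyRange 0 rc 1).foldl (fun (st : Int × List (Int × Int)) i =>
    (PySem.List.pyRange 0 cc 1).foldl (fun st j =>
      if pvCell graph i j == '.' && !st.2.contains (i, j) then
        let p := pvFill rc cc graph [(i, j)] st.2
        (max st.1 p.1, p.2)
      else st) st) ((0 : Int), ([] : List (Int × Int)))).1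

-- ===== PRECONDITION & SPEC =====
-- Exactly the inputs on which Python A returns: whenever both ranges are nonempty, every
-- scanned row index and column index must exist (otherwise graph[i][j] raises IndexError).
def Pre_jumanji_max_diamond (rc : Int) (cc : Int) (graph : List String) : Prop :=
  rc ≤ 0 ∨ cc ≤ 0 ∨ (rc ≤ (graph.length : Int) ∧
    ∀ s ∈ graph.take rc.toNat, cc ≤ (s.toList.length : Int))
instance (rc : Int) (cc : Int) (graph : List String) : Decidable (Pre_jumanji_max_diamond rc cc graph) := by
  unfold Pre_jumanji_max_diamond; infer_instance

def pvWitness_jumanji_max_diamond : Int × Int × List String := (2, 3, ["D.D", ".#."])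

def Spec_jumanji_max_diamond (rc : Int) (cc : Int) (graph : List String) (out : Int) : Prop := out = jumanji_max_diamond_alt rc cc graph
instance (rc : Int) (cc : Int) (graph : List String) (out : Int) : Decidable (Spec_jumanji_max_diamond rc cc graph out) := by unfold Spec_jumanji_max_diamond; infer_instance

-- ===== CLAIM (what is proved, stated in full; the proofs are below) =====
def Claim_equal_jumanji_max_diamond : Prop := ∀ (rc : Int) (cc : Int) (graph : List String), Dom_jumanji_max_diamond rc cc graph → Pre_jumanji_max_diamond rc cc graph → Spec_jumanji_max_diamond rc cc graph (jumanji_max_diamond rc cc graph)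

-- ===== LEMMAS AND PROOFS =====

theorem pvDfsA_subset (rc cc : Int) (graph : List String) :
    ∀ (f : Nat) (r c : Int) (v : List (Int × Int)) (x : Int × Int),
      x ∈ v → x ∈ (pvDfsA rc cc graph f r c v).2 := by
  intro f
  induction f with
  | zero => intro r c v x hx; simpa [pvDfsA] using hx
  | succ f ih =>
    intro r c v x hx
    rw [pvDfsA]
    split
    · exact hx
    · exact ih _ _ _ _ (ih _ _ _ _ (ih _ _ _ _ (ih _ _ _ _ (List.mem_cons_of_mem _ hx))))

theorem pvFree_anti (rc cc : Int) (v v' : List (Int × Int))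
    (h : ∀ x, x ∈ v → x ∈ v') : pvFree rc cc v' ≤ pvFree rc cc v := by
  apply pv_length_filter_mono
  intro x hx
  simp only [Bool.not_eq_true', List.contains_eq_mem, decide_eq_false_iff_not] at hx ⊢
  intro hm; exact hx (h x hm)

theorem pvDfsA_free_le (rc cc : Int) (graph : List String) (f : Nat) (r c : Int)
    (v : List (Int × Int)) :
    pvFree rc cc (pvDfsA rc cc graph f r c v).2 ≤ pvFree rc cc v :=
  pvFree_anti rc cc v _ (fun x hx => pvDfsA_subset rc cc graph f r c v x hx)

-- the bridge: running the fill on a stack headed by (r, c) is A's dfs at (r, c)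
-- followed by the fill of the rest of the stack on the enlarged visited set
theorem pvFill_bridge (rc cc : Int) (graph : List String) :
    ∀ (f : Nat) (r c : Int) (v : List (Int × Int)) (S : List (Int × Int)),
      pvFree rc cc v < f →
      pvFill rc cc graph ((r, c) :: S) v =
        ((pvDfsA rc cc graph f r c v).1 +
            (pvFill rc cc graph S (pvDfsA rc cc graph f r c v).2).1,
          (pvFill rc cc graph S (pvDfsA rc cc graph f r c v).2).2) := by
  intro f
  induction f with
  | zero => intro r c v S h; omega
  | succ f ih =>
    intro r c v S h
    by_cases hb : pvBlocked rc cc graph r c v = true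
    · rw [pvFill, pvDfsA]
      simp [hb]
    · have hb' : pvBlocked rc cc graph r c v = false := by simpa using hb
      have hlt : pvFree rc cc ((r, c) :: v) < f := by
        have := pvFree_cons_lt rc cc graph r c v hb'
        omega
      rw [pvFill, pvDfsA, dif_neg hb, if_neg hb]
      simp only
      have l1 := lt_of_le_of_lt (pvDfsA_free_le rc cc graph f (r + 1) c ((r, c) :: v)) hlt
      have l2 := lt_of_le_of_lt (pvDfsA_free_le rc cc graph f (r - 1) c _) l1
      have l3 := lt_of_le_of_lt (pvDfsA_free_le rc cc graph f r (c + 1) _) l2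
      rw [ih (r + 1) c ((r, c) :: v) _ hlt]
      rw [ih (r - 1) c _ _ l1]
      rw [ih r (c + 1) _ _ l2]
      rw [ih r (c - 1) _ _ l3]
      refine Prod.ext ?_ rfl
      simp only
      ring

-- the fuel used by A's port always exceeds the number of unvisited cells
theorem pvFill_single (rc cc : Int) (graph : List String) (r c : Int) (v : List (Int × Int)) :
    pvFill rc cc graph [(r, c)] v = pvDfsA rc cc graph ((pvCells rc cc).length + 1) r c v := by
  have h : pvFree rc cc v < (pvCells rc cc).length + 1 :=
    Nat.lt_succ_of_le (List.length_filter_le _ _)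
  rw [pvFill_bridge rc cc graph ((pvCells rc cc).length + 1) r c v [] h]
  rw [pvFill]
  simp

theorem pv_ports_eq (rc cc : Int) (graph : List String) :
    jumanji_max_diamond_alt rc cc graph = jumanji_max_diamond rc cc graph := by
  unfold jumanji_max_diamond jumanji_max_diamond_alt
  simp only [pvFill_single]

-- ===== VERDICT (by name: the statement is the Claim_ definition above) =====
theorem jumanji_max_diamond_spec : Claim_equal_jumanji_max_diamond := by
  intro rc cc graph _ _
  unfold Spec_jumanji_max_diamond
  exact (pv_ports_eq rc cc graph).symm
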